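-- pv_equiv track=rewrite | github.com/tjdwls101010/Dumok-of-WallStreet | plugins/Invest/skills/MarketData/scripts/technical/entry_patterns.py | _determine_readiness
-- ===== SOURCE A (Python) =====
-- def _determine_readiness(patterns):
-- 	"""Determine setup readiness from detected patterns.
--
-- 	actionable: 1+ high quality pattern detected
-- 	developing: 1+ moderate quality pattern detected
-- 	none: no patterns detected
-- 	"""
-- 	if not patterns:
-- 		return "none"
-- 	qualities = [p["quality"] for p in patterns]
-- 	if "high" in qualities:
-- 		return "actionable"
-- 	if "moderate" in qualities:
-- 		return "developing"
-- 	return "none"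
-- ===== SOURCE B (Python) =====
-- _RANK = {"high": 2, "moderate": 1}
-- _LABELS = ("none", "developing", "actionable")
--
--
-- def _determine_readiness(patterns):
-- 	"""Score each pattern's quality numerically (high=2, moderate=1, other=0),
-- 	reduce with max, and decode the best score through a label table."""
-- 	score = 0
-- 	for p in patterns:
-- 		score = max(score, _RANK.get(p["quality"], 0))
-- 	return _LABELS[score]
-- ===== Notes on version B (the rewrite author's own statement) =====
-- stated objective: alternative
-- what changed: Replaces A's list-of-qualities plus two ordered membership tests with a numeric priority lattice: each quality is mapped to a score (high=2, moderate=1, other=0), the scores are reduced with max, and the result is decoded through a label table instead of an if-chain.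
import Mathlib
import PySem

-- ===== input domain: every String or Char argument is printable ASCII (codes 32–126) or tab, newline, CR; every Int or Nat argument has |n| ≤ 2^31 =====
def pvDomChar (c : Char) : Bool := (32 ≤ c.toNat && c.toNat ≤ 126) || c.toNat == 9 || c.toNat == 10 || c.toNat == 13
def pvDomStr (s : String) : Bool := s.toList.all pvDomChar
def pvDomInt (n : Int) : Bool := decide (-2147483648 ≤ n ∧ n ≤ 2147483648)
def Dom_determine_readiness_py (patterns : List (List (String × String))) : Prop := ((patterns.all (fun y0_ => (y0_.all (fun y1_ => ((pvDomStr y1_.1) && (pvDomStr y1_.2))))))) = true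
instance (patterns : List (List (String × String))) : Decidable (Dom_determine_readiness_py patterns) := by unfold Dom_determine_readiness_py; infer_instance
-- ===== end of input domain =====

-- B replaces A's qualities list + two membership scans with a numeric priority score (max-reduction) decoded by a label table (objective: alternative).


-- p["quality"]: first-match lookup in the association list; exact for a Python dict (unique keys).
-- Under Pre_ the key is present, so the "" default is never used (Python raises KeyError there).
def pvQuality (p : List (String × String)) : String :=
  ((p.find? (fun kv => kv.1 == "quality")).map (·.2)).getD ""

-- ===== PORT A =====
def determine_readiness_py (patterns : List (List (String × String))) : String :=
  if patterns = [] then "none"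
  else
    let qualities := patterns.map pvQuality
    if qualities.contains "high" then "actionable"
    else if qualities.contains "moderate" then "developing"
    else "none"

-- ===== PORT B =====
-- _RANK.get(p["quality"], 0): the module-level score table, 0 for unknown qualities
def pvRank (p : List (String × String)) : Nat :=
  PySem.Dict.getD (PySem.Dict.ofList [("high", 2), ("moderate", 1)]) (pvQuality p) 0

def determine_readiness_py_alt (patterns : List (List (String × String))) : String :=
  let score := patterns.foldl (fun s p => Nat.max s (pvRank p)) 0
  -- _LABELS[score]: score is always 0, 1 or 2, so the nonnegative index is in range
  PySem.List.pyGetD ["none", "developing", "actionable"] (score : Int) ""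

-- ===== PRECONDITION & SPEC =====
-- Pre_ excludes exactly the inputs where Python A raises KeyError: a pattern without a "quality" key
-- (B raises there too; A returns on every input Pre_ admits).
def Pre_determine_readiness_py (patterns : List (List (String × String))) : Prop :=
  (patterns.all (fun p => p.any (fun kv => kv.1 == "quality"))) = true
instance (patterns : List (List (String × String))) : Decidable (Pre_determine_readiness_py patterns) := by unfold Pre_determine_readiness_py; infer_instance
def pvWitness_determine_readiness_py : (List (List (String × String))) := [[("quality", "high")], [("quality", "low")]]

def Spec_determine_readiness_py (patterns : List (List (String × String))) (out : String) : Prop := out = determine_readiness_py_alt patterns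
instance (patterns : List (List (String × String))) (out : String) : Decidable (Spec_determine_readiness_py patterns out) := by unfold Spec_determine_readiness_py; infer_instance

-- ===== CLAIM (what is proved, stated in full; the proofs are below) =====
def Claim_equal_determine_readiness_py : Prop := ∀ (patterns : List (List (String × String))), Dom_determine_readiness_py patterns → Pre_determine_readiness_py patterns → Spec_determine_readiness_py patterns (determine_readiness_py patterns)

-- ===== LEMMAS AND PROOFS =====

-- the best score of a list of patterns, characterised by the qualities it contains
def pvBest (patterns : List (List (String × String))) : Nat :=
  if (patterns.map pvQuality).contains "high" then 2
  else if (patterns.map pvQuality).contains "moderate" then 1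
  else 0

theorem pv_rank_items :
    (PySem.Dict.ofList [(("high" : String), (2 : Nat)), ("moderate", 1)]).items
      = [("high", 2), ("moderate", 1)] := by decide

theorem pv_rank_eq (p : List (String × String)) :
    pvRank p = if pvQuality p = "high" then 2 else if pvQuality p = "moderate" then 1 else 0 := by
  unfold pvRank
  rw [PySem.Dict.getD, PySem.Dict.get?, pv_rank_items]
  split_ifs with h1 h2
  · simp [h1]
  · simp [h2]
  · simp [beq_eq_false_iff_ne.mpr (fun h => h1 h.symm),
      beq_eq_false_iff_ne.mpr (fun h => h2 h.symm)]

theorem pv_best_cons (p : List (String × String)) (rest : List (List (String × String))) :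
    pvBest (p :: rest) = Nat.max (pvRank p) (pvBest rest) := by
  rw [pv_rank_eq]
  unfold pvBest
  simp only [List.map_cons, List.contains_cons]
  by_cases hh : pvQuality p = "high"
  · simp [hh]; split_ifs <;> decide
  · by_cases hm : pvQuality p = "moderate"
    · simp [hm]
      split_ifs <;> decide
    · simp [hh, hm,
        show ¬ ("high" : String) = pvQuality p from fun h => hh h.symm,
        show ¬ ("moderate" : String) = pvQuality p from fun h => hm h.symm]

-- B's max-fold from start value a computes max a (pvBest patterns)
theorem pv_fold_max (patterns : List (List (String × String))) (a : Nat) :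
    patterns.foldl (fun s p => Nat.max s (pvRank p)) a = Nat.max a (pvBest patterns) := by
  induction patterns generalizing a with
  | nil => simp [pvBest]
  | cons p rest ih =>
    simp only [List.foldl_cons]
    rw [ih, pv_best_cons]
    simp only [Nat.max_def]; split_ifs <;> omega

-- ===== VERDICT (by name: the statement is the Claim_ definition above) =====
theorem determine_readiness_py_spec : Claim_equal_determine_readiness_py := by
  intro patterns _ _
  unfold Spec_determine_readiness_py determine_readiness_py determine_readiness_py_alt
  rw [pv_fold_max]
  have h0 : Nat.max 0 (pvBest patterns) = pvBest patterns := by simp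
  rw [h0]
  unfold pvBest
  cases patterns with
  | nil => decide
  | cons p rest =>
    simp only [reduceCtorEq, if_false]
    split_ifs <;> decide
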